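-- pv_equiv track=rewrite | github.com/mesolitica/malaya | malaya/text_functions.py | sentence_ngram
-- ===== SOURCE A (Python) =====
-- import itertools
--
-- def pad_sequence(
--     sequence,
--     n,
--     pad_left = False,
--     pad_right = False,
--     left_pad_symbol = None,
--     right_pad_symbol = None,
-- ):
--     sequence = iter(sequence)
--     if pad_left:
--         sequence = itertools.chain((left_pad_symbol,) * (n - 1), sequence)
--     if pad_right:
--         sequence = itertools.chain(sequence, (right_pad_symbol,) * (n - 1))
--     return sequence
--
-- def ngrams(
--     sequence,
--     n,
--     pad_left = False,
--     pad_right = False,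
--     left_pad_symbol = None,
--     right_pad_symbol = None,
-- ):
--     sequence = pad_sequence(
--         sequence, n, pad_left, pad_right, left_pad_symbol, right_pad_symbol
--     )
--
--     history = []
--     while n > 1:
--         try:
--             next_item = next(sequence)
--         except StopIteration:
--             return
--         history.append(next_item)
--         n -= 1
--     for item in sequence:
--         history.append(item)
--         yield tuple(history)
--         del history[0]
--
-- def sentence_ngram(sentence, ngram = (1, 3)):
--     words = sentence.split()
--     sentences = []
--     for gram in range(ngram[0], ngram[1] + 1, 1):
--         gram_words = list(ngrams(words, gram))
--         for sentence in gram_words: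
--             sentences.append(' '.join(sentence))
--     return list(set(sentences))
-- ===== SOURCE B (Python) =====
-- def sentence_ngram(sentence, ngram=(1, 3)):
--     words = sentence.split()
--     grams = set()
--     for n in range(max(ngram[0], 1), ngram[1] + 1):
--         for i in range(len(words) - n + 1):
--             grams.add(' '.join(words[i:i + n]))
--     return list(grams)
-- ===== Notes on version B (the rewrite author's own statement) =====
-- stated objective: faster
-- what changed: Dropped the pad_sequence/ngrams sliding-window generator and the intermediate sentences list: B slices the word list positionally and adds each join straight into a set, skipping non-positive gram sizes instead of letting them degenerate to unigrams.
-- intended difference: When ngram[0] <= ngram[1] <= 0 and the sentence contains words, A returns the deduped unigrams (its generator degenerates to window size 1 for every n <= 0) while B returns [], the intended result since no n-gram of non-positive size exists; when the range also reaches n >= 1 those accidental unigrams are absorbed by deduplication and A = B. — e.g. on sentence_ngram("a b", (-1, 0)): A returns ["a", "b"], B returns []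
import Mathlib
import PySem

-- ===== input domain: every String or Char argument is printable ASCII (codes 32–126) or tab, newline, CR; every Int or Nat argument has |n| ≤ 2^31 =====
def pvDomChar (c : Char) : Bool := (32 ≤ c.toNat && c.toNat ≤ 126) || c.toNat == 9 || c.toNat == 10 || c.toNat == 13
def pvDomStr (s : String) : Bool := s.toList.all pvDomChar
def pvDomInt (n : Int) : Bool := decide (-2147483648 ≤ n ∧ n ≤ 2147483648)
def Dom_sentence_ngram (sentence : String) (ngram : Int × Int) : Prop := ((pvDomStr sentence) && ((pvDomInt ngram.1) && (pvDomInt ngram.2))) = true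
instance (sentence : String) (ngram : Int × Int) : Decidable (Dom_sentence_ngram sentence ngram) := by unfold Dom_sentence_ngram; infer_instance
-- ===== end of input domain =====

-- B replaces the pad_sequence/ngrams sliding-window generator by direct positional slicing
-- of the word list into a set built in one pass; non-positive gram sizes are skipped instead
-- of accidentally emitting unigrams (see D_sentence_ngram below).


-- ===== PORT A =====
-- the 'for item in sequence: history.append(item); yield tuple(history); del history[0]' loop of ngrams
def pvNgramsLoop (seq : List String) (history : List String) : List (List String) :=
  match seq with
  | [] => []
  | x :: rest => (history ++ [x]) :: pvNgramsLoop rest ((history ++ [x]).drop 1)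

-- the 'while n > 1' prefix-consuming loop of ngrams, followed by the yield loop
-- (pad_left/pad_right are False at the only call site, so pad_sequence is the identity)
def pvNgramsAux (seq : List String) (n : Int) (history : List String) : List (List String) :=
  match seq with
  | [] => if n > 1 then [] else pvNgramsLoop [] history
  | x :: rest => if n > 1 then pvNgramsAux rest (n - 1) (history ++ [x]) else pvNgramsLoop (x :: rest) history

def sentence_ngram (sentence : String) (ngram : Int × Int) : List String :=
  let words := PySem.Str.split₀ sentence
  let sentences :=
    (PySem.List.pyRange ngram.1 (ngram.2 + 1) 1).foldl
      (fun sentences gram =>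
        let gram_words := pvNgramsAux words gram []
        gram_words.foldl (fun sentences t => sentences ++ [PySem.Str.join " " t]) sentences)
      []
  PySem.Set.ofList sentences

-- ===== PORT B =====
def sentence_ngram_alt (sentence : String) (ngram : Int × Int) : List String :=
  let words := PySem.Str.split₀ sentence
  (PySem.List.pyRange (max ngram.1 1) (ngram.2 + 1) 1).foldl
    (fun grams n =>
      (PySem.List.pyRange 0 ((words.length : Int) - n + 1) 1).foldl
        (fun grams i =>
          PySem.Set.add grams (PySem.Str.join " " (PySem.List.slice words (some i) (some (i + n)))))
        grams)
    PySem.Set.empty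

-- ===== PRECONDITION & SPEC =====
-- When ngram.1 ≤ ngram.2 ≤ 0 and the sentence contains words, A returns the deduped unigrams
-- (its generator degenerates to window size 1 for every n ≤ 0) while B returns [], the intended
-- result since no n-gram of non-positive size exists.
def D_sentence_ngram (sentence : String) (ngram : Int × Int) : Prop :=
  ngram.1 ≤ ngram.2 ∧ ngram.2 ≤ 0 ∧ PySem.Str.split₀ sentence ≠ []
instance (sentence : String) (ngram : Int × Int) : Decidable (D_sentence_ngram sentence ngram) := by
  unfold D_sentence_ngram; infer_instance

def Spec_sentence_ngram (sentence : String) (ngram : Int × Int) (out : List String) : Prop :=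
  ¬ D_sentence_ngram sentence ngram → out = sentence_ngram_alt sentence ngram
instance (sentence : String) (ngram : Int × Int) (out : List String) : Decidable (Spec_sentence_ngram sentence ngram out) := by
  unfold Spec_sentence_ngram; infer_instance

def pvDiffWitness_sentence_ngram : String × (Int × Int) := ("a b", (-1, 0))
def pvDiffWitnessOut_sentence_ngram : (List String) × (List String) := (["a", "b"], [])

-- ===== CLAIM (what is proved, stated in full; the proofs are below) =====
def Claim_unchanged_sentence_ngram : Prop := ∀ (sentence : String) (ngram : Int × Int), Dom_sentence_ngram sentence ngram → Spec_sentence_ngram sentence ngram (sentence_ngram sentence ngram)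
def Claim_changed_sentence_ngram : Prop := Dom_sentence_ngram (pvDiffWitness_sentence_ngram.1) (pvDiffWitness_sentence_ngram.2) ∧ D_sentence_ngram (pvDiffWitness_sentence_ngram.1) (pvDiffWitness_sentence_ngram.2) ∧ sentence_ngram (pvDiffWitness_sentence_ngram.1) (pvDiffWitness_sentence_ngram.2) = pvDiffWitnessOut_sentence_ngram.1 ∧ sentence_ngram_alt (pvDiffWitness_sentence_ngram.1) (pvDiffWitness_sentence_ngram.2) = pvDiffWitnessOut_sentence_ngram.2 ∧ pvDiffWitnessOut_sentence_ngram.1 ≠ pvDiffWitnessOut_sentence_ngram.2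
def Claim_exact_sentence_ngram : Prop := ∀ (sentence : String) (ngram : Int × Int), Dom_sentence_ngram sentence ngram → D_sentence_ngram sentence ngram → sentence_ngram sentence ngram ≠ sentence_ngram_alt sentence ngram

-- ===== LEMMAS AND PROOFS =====

-- the n-gram strings one gram size contributes, as A computes them
def pvGramA (words : List String) (g : Int) : List String :=
  (pvNgramsAux words g []).map (PySem.Str.join " ")

-- the n-gram strings one gram size contributes, as B computes them
def pvGramB (words : List String) (n : Int) : List String :=
  (PySem.List.pyRange 0 ((words.length : Int) - n + 1) 1).map
    (fun i => PySem.Str.join " " (PySem.List.slice words (some i) (some (i + n))))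

theorem pvLoop_eq (seq : List String) : ∀ pre : List String,
    pvNgramsLoop seq pre =
      (List.range seq.length).map (fun i => ((pre ++ seq).drop i).take (pre.length + 1)) := by
  induction seq with
  | nil => intro pre; simp [pvNgramsLoop]
  | cons x rest ih =>
    intro pre
    rw [pvNgramsLoop, ih, List.length_cons, List.range_succ_eq_map]
    simp only [List.map_cons, List.map_map]
    congr 1
    · rw [List.drop_zero, List.take_append]
      simp
    · apply List.map_congr_left
      intro i _
      have h1 : List.drop 1 (pre ++ [x]) ++ rest = List.drop 1 (pre ++ x :: rest) := by
        rw [List.drop_append, List.drop_append]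
        cases pre <;> simp
      rw [h1, List.drop_drop]
      have h2 : (List.drop 1 (pre ++ [x])).length = pre.length := by simp
      rw [h2]
      simp [Function.comp, Nat.add_comm 1 i, Nat.succ_eq_add_one]

theorem pvAux_eq (m : Nat) : ∀ (seq pre : List String),
    pvNgramsAux seq ((m : Int) + 1) pre =
      if m ≤ seq.length then pvNgramsLoop (seq.drop m) (pre ++ seq.take m) else [] := by
  induction m with
  | zero =>
    intro seq pre
    cases seq <;> simp [pvNgramsAux]
  | succ m ih =>
    intro seq pre
    cases seq with
    | nil =>
      have h : ((m : Int) + 1) + 1 > 1 := by omega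
      simp [pvNgramsAux, h]
    | cons x rest =>
      have h : ((m : Int) + 1) + 1 > 1 := by omega
      rw [pvNgramsAux]
      simp only [show (((m+1:Nat) : Int) + 1) = ((m:Int)+1)+1 by push_cast; ring, if_pos h,
        show ((m:Int)+1)+1-1 = (m:Int)+1 by ring, ih]
      by_cases hm : m ≤ rest.length
      · rw [if_pos hm, if_pos (by simpa using Nat.succ_le_succ hm)]
        simp
      · rw [if_neg hm, if_neg (by simpa using fun hh => hm (Nat.le_of_succ_le_succ hh))]

theorem pvGramA_eq_pos (words : List String) (m : Nat) :
    pvGramA words ((m : Int) + 1) =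
      (List.range (words.length - m)).map
        (fun i => PySem.Str.join " " ((words.drop i).take (m + 1))) := by
  unfold pvGramA
  rw [pvAux_eq]
  by_cases hm : m ≤ words.length
  · rw [if_pos hm, pvLoop_eq]
    have hl : (List.take m words).length = m := by simp [hm]
    rw [List.nil_append, List.take_append_drop, List.length_drop, hl, List.map_map]
    rfl
  · rw [if_neg hm]
    have : words.length - m = 0 := by omega
    simp [this]

theorem pvGramB_eq (words : List String) (m : Nat) :
    pvGramB words ((m : Int) + 1) =
      (List.range (words.length - m)).map
        (fun i => PySem.Str.join " " ((words.drop i).take (m + 1))) := by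
  unfold pvGramB
  by_cases hm : m ≤ words.length
  · have hb : ((words.length : Int) - ((m : Int) + 1) + 1) = ((words.length - m : Nat) : Int) := by
      push_cast [hm]; ring
    rw [hb, PySem.List.pyRange_zero_nat, List.map_map]
    apply List.map_congr_left
    intro i _
    have : ((i : Int) + ((m : Int) + 1)) = ((i : Int) + ((m + 1 : Nat) : Int)) := by push_cast; ring
    simp only [Function.comp_apply, this, PySem.List.slice_natCast_add]
  · have hb : ((words.length : Int) - ((m : Int) + 1) + 1) ≤ 0 := by omega
    rw [PySem.List.pyRange_one_eq_nil hb]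
    have : words.length - m = 0 := by omega
    simp [this]

theorem pvGramA_le_one (words : List String) (g : Int) (hg : g ≤ 1) :
    pvGramA words g = pvGramA words 1 := by
  have h1 : ¬ g > 1 := by omega
  have h2 : ¬ (1 : Int) > 1 := by omega
  cases words <;> simp [pvGramA, pvNgramsAux, h1]

theorem pvGram_eq (words : List String) (g : Int) (hg : 1 ≤ g) :
    pvGramA words g = pvGramB words g := by
  obtain ⟨m, rfl⟩ : ∃ m : Nat, g = (m : Int) + 1 := ⟨(g - 1).toNat, by omega⟩
  rw [pvGramA_eq_pos, pvGramB_eq]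

theorem pvGramA_nil (g : Int) : pvGramA [] g = [] := by
  by_cases h : g > 1 <;> simp [pvGramA, pvNgramsAux, pvNgramsLoop, h]

theorem pvA_eq (sentence : String) (ngram : Int × Int) :
    sentence_ngram sentence ngram =
      PySem.Set.ofList
        ((PySem.List.pyRange ngram.1 (ngram.2 + 1) 1).flatMap (pvGramA (PySem.Str.split₀ sentence))) := by
  unfold sentence_ngram
  simp only [PySem.List.foldl_append_singleton_eq_map]
  rw [show (fun (sentences : List String) (gram : Int) =>
        sentences ++ (pvNgramsAux (PySem.Str.split₀ sentence) gram []).map (PySem.Str.join " "))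
      = (fun sentences gram => sentences ++ pvGramA (PySem.Str.split₀ sentence) gram) from rfl,
    PySem.List.foldl_append_eq_flatMap]
  simp

theorem pvFoldlAddFlat {α : Type} [BEq α] (L : Int → List α) (r : List Int) :
    ∀ s : PySem.Set α,
    r.foldl (fun s n => (L n).foldl PySem.Set.add s) s = ((r.flatMap L).foldl PySem.Set.add s) := by
  induction r with
  | nil => intro s; simp
  | cons g r ih => intro s; rw [List.flatMap_cons, List.foldl_append, List.foldl_cons, ih]

theorem pvB_eq (sentence : String) (ngram : Int × Int) :
    sentence_ngram_alt sentence ngram =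
      PySem.Set.ofList
        ((PySem.List.pyRange (max ngram.1 1) (ngram.2 + 1) 1).flatMap (pvGramB (PySem.Str.split₀ sentence))) := by
  unfold sentence_ngram_alt pvGramB
  have h : ∀ (grams : PySem.Set String) (n : Int),
      (PySem.List.pyRange 0 (((PySem.Str.split₀ sentence).length : Int) - n + 1) 1).foldl
        (fun grams i => PySem.Set.add grams
          (PySem.Str.join " " (PySem.List.slice (PySem.Str.split₀ sentence) (some i) (some (i + n))))) grams
      = ((PySem.List.pyRange 0 (((PySem.Str.split₀ sentence).length : Int) - n + 1) 1).map
          (fun i => PySem.Str.join " " (PySem.List.slice (PySem.Str.split₀ sentence) (some i) (some (i + n))))).foldl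
          PySem.Set.add grams := by
    intro grams n
    rw [List.foldl_map]
  simp only [h]
  rw [pvFoldlAddFlat]
  rfl

theorem pvAdd_self {α : Type} [BEq α] [LawfulBEq α] (s : PySem.Set α) (x : α) (h : x ∈ s) :
    PySem.Set.add s x = s := by
  simp [PySem.Set.add, PySem.Set.contains, h]


theorem pvFoldl_add_absorb {α : Type} [BEq α] [LawfulBEq α] (l : List α) :
    ∀ s : PySem.Set α, (∀ y ∈ l, y ∈ s) → l.foldl PySem.Set.add s = s := by
  induction l with
  | nil => intro s _; rfl
  | cons y l ih =>
    intro s h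
    rw [List.foldl_cons, pvAdd_self s y (h y (by simp)), ih s (fun z hz => h z (by simp [hz]))]

theorem pvFoldl_add_flat_const {α : Type} [BEq α] [LawfulBEq α] (f : Int → List α) (U : List α)
    (r : List Int) (hU : ∀ g ∈ r, f g = U) :
    ∀ (Z : List α) (s : PySem.Set α), (∀ x ∈ U, x ∈ s) →
      (r.flatMap f ++ Z).foldl PySem.Set.add s = Z.foldl PySem.Set.add s := by
  induction r with
  | nil => intro Z s _; simp
  | cons g r ih =>
    intro Z s hs
    rw [List.flatMap_cons, hU g (by simp), List.append_assoc, List.foldl_append,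
      pvFoldl_add_absorb U s hs]
    exact ih (fun g' hg' => hU g' (by simp [hg'])) Z s hs

theorem pvOfList_flat_const {α : Type} [BEq α] [LawfulBEq α] (f : Int → List α) (U X : List α)
    (r : List Int) (hU : ∀ g ∈ r, f g = U) :
    PySem.Set.ofList (r.flatMap f ++ (U ++ X)) = PySem.Set.ofList (U ++ X) := by
  cases r with
  | nil => simp
  | cons g r =>
    show ((g :: r).flatMap f ++ (U ++ X)).foldl PySem.Set.add PySem.Set.empty
        = (U ++ X).foldl PySem.Set.add PySem.Set.empty
    rw [List.flatMap_cons, hU g (by simp), List.append_assoc, List.foldl_append (l := U)]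
    have hmem : ∀ x ∈ U, x ∈ U.foldl PySem.Set.add PySem.Set.empty := by
      intro x hx
      exact (PySem.Set.mem_ofList U x).2 hx
    rw [pvFoldl_add_flat_const f U r (fun g' hg' => hU g' (by simp [hg'])) _ _ hmem,
      List.foldl_append (l := U), pvFoldl_add_absorb U _ hmem, List.foldl_append]

theorem pvMain_unchanged (sentence : String) (ngram : Int × Int)
    (hD : ¬ D_sentence_ngram sentence ngram) :
    sentence_ngram sentence ngram = sentence_ngram_alt sentence ngram := by
  obtain ⟨a, b⟩ := ngram
  rw [pvA_eq, pvB_eq]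
  dsimp only
  set words := PySem.Str.split₀ sentence with hwords
  by_cases hab : b + 1 ≤ a
  · rw [PySem.List.pyRange_one_eq_nil hab, PySem.List.pyRange_one_eq_nil (show b + 1 ≤ max a 1 by omega)]
    rfl
  · by_cases h1a : 1 ≤ a
    · have hmax : max a 1 = a := by omega
      rw [hmax]
      congr 1
      exact List.flatMap_congr (fun g hg =>
        pvGram_eq words g (by have := PySem.List.mem_pyRange_one.1 hg; omega))
    · by_cases hb0 : b ≤ 0
      · have hw : words = [] := by
          by_contra hne
          exact hD ⟨by omega, hb0, hne⟩
        rw [hw]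
        have hA : ∀ r : List Int, r.flatMap (pvGramA []) = [] := by
          intro r
          simp [List.flatMap_eq_nil_iff, pvGramA_nil]
        rw [hA, show max a 1 = 1 from by omega, PySem.List.pyRange_one_eq_nil (by omega)]
        rfl
      · have hmax : max a 1 = 1 := by omega
        rw [hmax,
          PySem.List.pyRange_one_append a 1 (b + 1) (by omega) (by omega), List.flatMap_append,
          List.flatMap_congr (l := PySem.List.pyRange 1 (b + 1) 1) (f := pvGramA words)
            (g := pvGramB words) (fun g hg =>
              pvGram_eq words g (by have := PySem.List.mem_pyRange_one.1 hg; omega)),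
          PySem.List.pyRange_one_cons (show (1 : Int) < b + 1 by omega), List.flatMap_cons]
        exact pvOfList_flat_const (pvGramA words) (pvGramB words 1) _ _
          (fun g hg => by
            have := PySem.List.mem_pyRange_one.1 hg
            rw [pvGramA_le_one words g (by omega), pvGram_eq words 1 (by omega)])

theorem pvMain_tight (sentence : String) (ngram : Int × Int) (hD : D_sentence_ngram sentence ngram) :
    sentence_ngram sentence ngram ≠ sentence_ngram_alt sentence ngram := by
  obtain ⟨a, b⟩ := ngram
  obtain ⟨hab, hb0, hw⟩ := hD
  set words := PySem.Str.split₀ sentence with hwords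
  obtain ⟨w, ws, hcons⟩ : ∃ w ws, words = w :: ws := by
    cases h : words with
    | nil => exact absurd h hw
    | cons w ws => exact ⟨w, ws, rfl⟩
  have hBnil : sentence_ngram_alt sentence (a, b) = [] := by
    rw [pvB_eq, PySem.List.pyRange_one_eq_nil (show b + 1 ≤ max a 1 by omega)]
    rfl
  rw [hBnil, pvA_eq]
  intro hEq
  have hga : pvGramA words a = pvGramB words 1 := by
    rw [pvGramA_le_one words a (by omega), pvGram_eq words 1 (by omega)]
  have hmem1 : PySem.Str.join " " [w] ∈ pvGramB words 1 := by
    rw [show (1 : Int) = ((0 : Nat) : Int) + 1 by norm_num, pvGramB_eq]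
    refine List.mem_map.2 ⟨0, ?_, by simp [hcons]⟩
    simp [hcons]
  have hmemA : PySem.Str.join " " [w] ∈
      (PySem.List.pyRange a (b + 1) 1).flatMap (pvGramA words) := by
    refine List.mem_flatMap.2 ⟨a, ?_, by rw [hga]; exact hmem1⟩
    exact PySem.List.mem_pyRange_one.2 ⟨le_refl a, by omega⟩
  have := (PySem.Set.mem_ofList _ _).2 hmemA
  rw [hEq] at this
  exact absurd this (List.not_mem_nil)

-- ===== VERDICT (by name: the statement is the Claim_ definition above) =====
theorem sentence_ngram_spec : Claim_unchanged_sentence_ngram := by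
  intro sentence ngram _ hD
  exact pvMain_unchanged sentence ngram hD

theorem sentence_ngram_changed : Claim_changed_sentence_ngram := by
  unfold Claim_changed_sentence_ngram; decide

theorem sentence_ngram_tight : Claim_exact_sentence_ngram := by
  intro sentence ngram _ hD
  exact pvMain_tight sentence ngram hD
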